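-- pv_equiv track=rewrite | github.com/ThirdAILabs/Universe | thirdai_python_package_tests/neural_db/benchmark_constrained_search.py | strings_of_length
-- ===== SOURCE A (Python) =====
-- def strings_of_length(length, num_strings):
--     alphabet = "abcdefghijklmnopqrstuvwxyz"
--     if num_strings > len(alphabet) ** length:
--         raise ValueError(
--             f"There are only {len(alphabet) ** length} strings of length {length}"
--         )
--
--     strings = ["" for _ in range(num_strings)]
--     for i in range(num_strings):
--         to_be_modded = i
--         for _ in range(length):
--             strings[i] += alphabet[to_be_modded % len(alphabet)]
--             to_be_modded //= len(alphabet)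
--     return strings
-- ===== SOURCE B (Python) =====
-- def strings_of_length(length, num_strings):
--     alphabet = "abcdefghijklmnopqrstuvwxyz"
--     if num_strings > len(alphabet) ** length:
--         raise ValueError(
--             f"There are only {len(alphabet) ** length} strings of length {length}"
--         )
--     # Odometer: keep the current word's digits (least-significant first) and
--     # bump them with carry between outputs, instead of re-dividing each index.
--     digits = [0] * length if length > 0 else []
--     out = []
--     for _ in range(num_strings):
--         out.append("".join(alphabet[d] for d in digits))
--         j = 0
--         while j < len(digits) and digits[j] == 25:
--             digits[j] = 0
--             j += 1
--         if j < len(digits):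
--             digits[j] += 1
--     return out
-- ===== Notes on version B (the rewrite author's own statement) =====
-- stated objective: faster
-- what changed: Replaces A's per-index inner divmod loop (recomputing every base-26 digit of each i from scratch, with repeated string concatenation) with a single odometer: the digit list is carried between outputs and incremented with carry, and each string is built once with join.
import Mathlib
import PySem

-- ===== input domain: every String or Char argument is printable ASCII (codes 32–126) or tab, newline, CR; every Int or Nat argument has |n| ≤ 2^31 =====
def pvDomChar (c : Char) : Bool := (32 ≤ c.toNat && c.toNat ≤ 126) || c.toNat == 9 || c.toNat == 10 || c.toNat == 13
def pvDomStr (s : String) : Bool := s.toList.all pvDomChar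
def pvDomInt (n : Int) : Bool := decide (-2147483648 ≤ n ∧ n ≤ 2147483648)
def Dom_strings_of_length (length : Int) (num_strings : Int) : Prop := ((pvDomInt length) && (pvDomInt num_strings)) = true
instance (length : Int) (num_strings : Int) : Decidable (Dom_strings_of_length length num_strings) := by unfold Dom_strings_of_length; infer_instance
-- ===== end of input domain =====

-- B replaces A's per-index inner divmod loop by an odometer that carries the digit list
-- from one string to the next (alternative decomposition, same worst-case cost).

-- ===== PORT A =====
-- the alphabet constant shared by both Python versions
def soaAlphabet : List Char := "abcdefghijklmnopqrstuvwxyz".toList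

-- per index i: for _ in range(length): s += alphabet[m % 26]; m //= 26
def strings_of_length (length : Int) (num_strings : Int) : List String :=
  (PySem.List.pyRange 0 num_strings 1).map (fun i =>
    String.ofList
      (((PySem.List.pyRange 0 length 1).foldl
        (fun (st : List Char × Int) _ =>
          (st.1 ++ [(PySem.List.pyGet? soaAlphabet (PySem.Int.mod st.2 26)).getD ' '],
           PySem.Int.floordiv st.2 26))
        (([] : List Char), i)).1))

-- ===== PORT B =====
-- the carry scan: while j < len(digits) and digits[j] == 25: digits[j] = 0; j += 1 ; then digits[j] += 1
def soaInc : List Int → List Int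
  | [] => []
  | d :: ds => if d == 25 then 0 :: soaInc ds else (d + 1) :: ds

-- "".join(alphabet[d] for d in digits)
def soaRender (digits : List Int) : String :=
  String.ofList (digits.map (fun d => (PySem.List.pyGet? soaAlphabet d).getD ' '))

-- for _ in range(num_strings): emit current digits, then bump the odometer
def soaGo : Nat → List Int → List String
  | 0, _ => []
  | n + 1, digits => soaRender digits :: soaGo n (soaInc digits)

def strings_of_length_alt (length : Int) (num_strings : Int) : List String :=
  soaGo num_strings.toNat (if 0 < length then List.replicate length.toNat 0 else [])

-- ===== PRECONDITION & SPEC =====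
-- Pre_ excludes exactly the inputs where Python raises ValueError, i.e. num_strings > 26**length
-- (for negative length 26**length is a small positive float, so only num_strings ≤ 0 returns).
-- The bound is stated with Nat.clog, which by Nat.clog_le_iff_le_pow is LITERALLY equivalent to
-- num_strings ≤ 26^length but evaluates without computing the huge power; nothing is capped.
def Pre_strings_of_length (length : Int) (num_strings : Int) : Prop :=
  if 0 ≤ length then Nat.clog 26 num_strings.toNat ≤ length.toNat else num_strings ≤ 0
instance (length : Int) (num_strings : Int) : Decidable (Pre_strings_of_length length num_strings) := by
  unfold Pre_strings_of_length; infer_instance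

def pvWitness_strings_of_length : Int × Int := (2, 5)

def Spec_strings_of_length (length : Int) (num_strings : Int) (out : List String) : Prop := out = strings_of_length_alt length num_strings
instance (length : Int) (num_strings : Int) (out : List String) : Decidable (Spec_strings_of_length length num_strings out) := by unfold Spec_strings_of_length; infer_instance

-- ===== CLAIM (what is proved, stated in full; the proofs are below) =====
def Claim_equal_strings_of_length : Prop := ∀ (length : Int) (num_strings : Int), Dom_strings_of_length length num_strings → Pre_strings_of_length length num_strings → Spec_strings_of_length length num_strings (strings_of_length length num_strings)

-- ===== LEMMAS AND PROOFS =====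

-- little-endian base-26 digit list of i, truncated to L digits
def soaDLE : Nat → Nat → List Int
  | 0, _ => []
  | L + 1, i => ((i % 26 : Nat) : Int) :: soaDLE L (i / 26)

theorem soaDLE_zero (L : Nat) : soaDLE L 0 = List.replicate L 0 := by
  induction L with
  | zero => rfl
  | succ L ih => simp [soaDLE, ih, List.replicate_succ]

theorem soaInc_dLE (L i : Nat) : soaInc (soaDLE L i) = soaDLE L (i + 1) := by
  induction L generalizing i with
  | zero => rfl
  | succ L ih =>
    simp only [soaDLE, soaInc]
    by_cases h : i % 26 = 25
    · have h0 : (i + 1) % 26 = 0 := by omega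
      have h1 : (i + 1) / 26 = i / 26 + 1 := by omega
      simp [h, h0, h1, ih]
    · have h0 : (i + 1) % 26 = i % 26 + 1 := by omega
      have h1 : (i + 1) / 26 = i / 26 := by omega
      have hb : ¬ ((((i % 26 : Nat) : Int)) == 25) = true := by
        simp; omega
      rw [if_neg hb]
      have h2 : ((i % 26 : Nat) : Int) + 1 = (((i + 1) % 26 : Nat) : Int) := by
        push_cast; omega
      rw [h2, h1]

theorem soaGo_dLE (L : Nat) : ∀ (n i : Nat),
    soaGo n (soaDLE L i) = (List.range n).map (fun k => soaRender (soaDLE L (i + k))) := by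
  intro n
  induction n with
  | zero => intro i; rfl
  | succ n ih =>
    intro i
    rw [List.range_succ_eq_map, List.map_cons, List.map_map]
    simp only [soaGo, soaInc_dLE, ih (i + 1)]
    congr 1
    apply List.map_congr_left
    intro k _
    have : i + 1 + k = i + (k + 1) := by omega
    simp [Function.comp, this]

-- A's inner loop from (cs, i) appends exactly the rendered digit list of i
theorem soaFoldA (l : List Int) : ∀ (i : Nat) (cs : List Char),
    (l.foldl
      (fun (st : List Char × Int) _ =>
        (st.1 ++ [(PySem.List.pyGet? soaAlphabet (PySem.Int.mod st.2 26)).getD ' '],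
         PySem.Int.floordiv st.2 26))
      (cs, (i : Int))).1
    = cs ++ (soaDLE l.length i).map (fun d => (PySem.List.pyGet? soaAlphabet d).getD ' ') := by
  induction l with
  | nil => intro i cs; simp [soaDLE]
  | cons h t ih =>
    intro i cs
    have hm : PySem.Int.mod (i : Int) 26 = ((i % 26 : Nat) : Int) := by
      exact_mod_cast PySem.Int.mod_natCast i 26
    have hd : PySem.Int.floordiv (i : Int) 26 = ((i / 26 : Nat) : Int) := by
      exact_mod_cast PySem.Int.floordiv_natCast i 26
    simp only [List.foldl_cons, hm, hd, ih (i / 26), List.length_cons, soaDLE, List.map_cons]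
    simp

theorem strings_of_length_eq_alt (length num_strings : Int) :
    strings_of_length length num_strings = strings_of_length_alt length num_strings := by
  unfold strings_of_length strings_of_length_alt
  have hinit : (if 0 < length then List.replicate length.toNat 0 else []) =
      soaDLE (PySem.List.pyRange 0 length 1).length 0 := by
    rw [PySem.List.length_pyRange_one, soaDLE_zero]
    split_ifs with h
    · simp
    · have hz : (length - 0).toNat = 0 := by omega
      rw [hz]
      rfl
  rw [hinit, soaGo_dLE, PySem.List.pyRange_one 0 num_strings]
  have hn : (num_strings - 0).toNat = num_strings.toNat := by omega
  rw [hn, List.map_map]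
  apply List.map_congr_left
  intro k _
  have h0 : ((0 : Int) + (k : Int)) = ((k : Nat) : Int) := by omega
  simp only [Function.comp, h0, soaFoldA (PySem.List.pyRange 0 length 1) k []]
  simp [soaRender]

-- ===== VERDICT (by name: the statement is the Claim_ definition above) =====
theorem strings_of_length_spec : Claim_equal_strings_of_length := by
  intro length num_strings _ _
  unfold Spec_strings_of_length
  exact strings_of_length_eq_alt length num_strings
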